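-- pv_equiv track=rewrite | github.com/tmweigand/PMMoTo | src/pmmoto/core/octants.py | feature_octants
-- ===== SOURCE A (Python) =====
-- import itertools
--
-- def generate_octant_mapping() -> dict[tuple[int, ...], int]:
--     """Generate the octant id labels."""
--     octants = list(itertools.product([-1, 1], repeat=3))
--     octant_mapping = {}
--     for octant_idx, oct in enumerate(octants):
--         octant_mapping[oct] = octant_idx
--     return octant_mapping
--
-- def feature_octants(feature: tuple[int, ...]) -> list[int]:
--     """Determine available octants for input feature."""
--     allowable_octants: list[int] = []
--     octants = generate_octant_mapping()
--     for signs, oct_idx in octants.items():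
--         match = True
--         for f, s in zip(feature, signs):
--             if f == 0:
--                 continue
--             elif f == 1 and s != -1:
--                 match = False
--                 break
--             elif f == -1 and s != 1:
--                 match = False
--                 break
--         if match:
--             allowable_octants.append(oct_idx)
--
--     return allowable_octants
-- ===== SOURCE B (Python) =====
-- import itertools
--
-- def feature_octants(feature):
--     """Determine available octants for input feature."""
--     bits = []
--     for i in range(3):
--         f = feature[i] if i < len(feature) else 0
--         if f == 1:
--             bits.append([0])
--         elif f == -1:
--             bits.append([1])
--         else:
--             bits.append([0, 1])
--     result = []
--     for combo in itertools.product(*bits):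
--         idx = 0
--         for b in combo:
--             idx = idx * 2 + b
--         result.append(idx)
--     return result
-- ===== Notes on version B (the rewrite author's own statement) =====
-- stated objective: simpler
-- what changed: Replaced the generated octant-tuple dictionary and the sign-matching inner loop with a direct per-coordinate allowed-bit computation whose 3-way product yields the octant indices.
import Mathlib
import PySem

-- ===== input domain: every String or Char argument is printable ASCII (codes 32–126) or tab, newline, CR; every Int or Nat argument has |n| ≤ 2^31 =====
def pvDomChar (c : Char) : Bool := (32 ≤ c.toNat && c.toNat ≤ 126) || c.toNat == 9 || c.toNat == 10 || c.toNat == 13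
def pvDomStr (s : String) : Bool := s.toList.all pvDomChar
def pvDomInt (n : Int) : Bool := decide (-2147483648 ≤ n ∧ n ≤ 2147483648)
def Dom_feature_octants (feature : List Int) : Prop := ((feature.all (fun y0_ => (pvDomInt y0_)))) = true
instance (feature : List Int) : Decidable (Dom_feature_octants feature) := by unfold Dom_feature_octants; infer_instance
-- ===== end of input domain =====

-- B drops the octant-index dictionary: per coordinate it derives the allowed bit set and folds a
-- 3-way product into indices directly (simpler, no dict).

-- ===== PORT A =====
-- itertools.product([-1, 1], repeat=3)
def pvOctProd : List (Int × Int × Int) :=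
  ([-1, 1] : List Int).flatMap (fun a =>
    ([-1, 1] : List Int).flatMap (fun b =>
      ([-1, 1] : List Int).map (fun c => (a, b, c))))

-- generate_octant_mapping(): dict octant-tuple -> enumerate index
def generate_octant_mapping : PySem.Dict (Int × Int × Int) Int :=
  (PySem.List.enumerate pvOctProd).foldl
    (fun d p => d.insert p.2 p.1) PySem.Dict.empty

-- the inner 'for f, s in zip(feature, signs)' loop with its break
def pvMatchLoop : List (Int × Int) → Bool
  | [] => true
  | (f, s) :: rest =>
    if f = 0 then pvMatchLoop rest
    else if f = 1 then (if s ≠ -1 then false else pvMatchLoop rest)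
    else if f = -1 then (if s ≠ 1 then false else pvMatchLoop rest)
    else pvMatchLoop rest

def feature_octants (feature : List Int) : List Int :=
  (generate_octant_mapping.items).foldl
    (fun acc p =>
      if pvMatchLoop (feature.zip [p.1.1, p.1.2.1, p.1.2.2]) then acc ++ [p.2] else acc)
    []

-- ===== PORT B =====
-- feature[i] if i < len(feature) else 0
def pvCoord (feature : List Int) (i : Nat) : Int :=
  if i < feature.length then (PySem.List.pyGet? feature (i : Int)).getD 0 else 0

-- allowed bit list for one coordinate value
def pvBits (f : Int) : List Int :=
  if f = 1 then [0] else if f = -1 then [1] else [0, 1]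

def feature_octants_alt (feature : List Int) : List Int :=
  let b0 := pvBits (pvCoord feature 0)
  let b1 := pvBits (pvCoord feature 1)
  let b2 := pvBits (pvCoord feature 2)
  b0.flatMap (fun x => b1.flatMap (fun y => b2.map (fun z => (x * 2 + y) * 2 + z)))

-- ===== PRECONDITION & SPEC =====
def Spec_feature_octants (feature : List Int) (out : List Int) : Prop := out = feature_octants_alt feature
instance (feature : List Int) (out : List Int) : Decidable (Spec_feature_octants feature out) := by unfold Spec_feature_octants; infer_instance

-- ===== CLAIM (what is proved, stated in full; the proofs are below) =====
def Claim_equal_feature_octants : Prop := ∀ (feature : List Int), Dom_feature_octants feature → Spec_feature_octants feature (feature_octants feature)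

-- ===== LEMMAS AND PROOFS =====

theorem pvItems_eval : generate_octant_mapping.items =
    [((-1, -1, -1), 0), ((-1, -1, 1), 1), ((-1, 1, -1), 2), ((-1, 1, 1), 3),
     ((1, -1, -1), 4), ((1, -1, 1), 5), ((1, 1, -1), 6), ((1, 1, 1), 7)] := by
  decide

-- A's result only depends on the first three coordinates
theorem pvA_take3 (a b c : Int) (rest : List Int) :
    feature_octants (a :: b :: c :: rest) = feature_octants [a, b, c] := by
  simp [feature_octants, List.zip]

theorem pvB_take3 (a b c : Int) (rest : List Int) :
    feature_octants_alt (a :: b :: c :: rest) = feature_octants_alt [a, b, c] := by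
  have h0 : (0:Int) ≤ (rest.length:Int) + 1 + 1 := by omega
  have h1 : (0:Int) ≤ (rest.length:Int) + 1 := by omega
  have h2 : (2:Int) ≤ (rest.length:Int) + 1 + 1 := by omega
  simp [feature_octants_alt, pvCoord, PySem.List.pyGet?, PySem.List.pyIdx?, h0, h1, h2]

-- the four possible shapes of pvBits, each pinned to the value of f
theorem pvBits_spec (f : Int) :
    (pvBits f = [0] ∧ f = 1) ∨ (pvBits f = [1] ∧ f = -1) ∨
    (pvBits f = [0, 1] ∧ f = 0) ∨ (pvBits f = [0, 1] ∧ f ≠ 0 ∧ f ≠ 1 ∧ f ≠ -1) := by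
  unfold pvBits
  by_cases h1 : f = 1 <;> by_cases h2 : f = -1 <;> by_cases h0 : f = 0 <;> simp_all

theorem pvAgree_nil : feature_octants [] = feature_octants_alt [] := by decide

theorem pvAgree1 (a : Int) : feature_octants [a] = feature_octants_alt [a] := by
  rcases pvBits_spec a with ⟨h, e⟩ | ⟨h, e⟩ | ⟨h, e⟩ | ⟨h, e1, e2, e3⟩ <;>
    simp_all [feature_octants, feature_octants_alt, pvItems_eval, pvMatchLoop, pvCoord, pvBits,
      PySem.List.pyGet?, PySem.List.pyIdx?]

theorem pvAgree2 (a b : Int) : feature_octants [a, b] = feature_octants_alt [a, b] := by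
  rcases pvBits_spec a with ⟨ha, ea⟩ | ⟨ha, ea⟩ | ⟨ha, ea⟩ | ⟨ha, ea1, ea2, ea3⟩ <;>
  rcases pvBits_spec b with ⟨hb, eb⟩ | ⟨hb, eb⟩ | ⟨hb, eb⟩ | ⟨hb, eb1, eb2, eb3⟩ <;>
    simp_all [feature_octants, feature_octants_alt, pvItems_eval, pvMatchLoop, pvCoord, pvBits,
      PySem.List.pyGet?, PySem.List.pyIdx?]

set_option maxHeartbeats 2000000 in
theorem pvAgree3 (a b c : Int) : feature_octants [a, b, c] = feature_octants_alt [a, b, c] := by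
  rcases pvBits_spec a with ⟨ha, ea⟩ | ⟨ha, ea⟩ | ⟨ha, ea⟩ | ⟨ha, ea1, ea2, ea3⟩ <;>
  rcases pvBits_spec b with ⟨hb, eb⟩ | ⟨hb, eb⟩ | ⟨hb, eb⟩ | ⟨hb, eb1, eb2, eb3⟩ <;>
  rcases pvBits_spec c with ⟨hc, ec⟩ | ⟨hc, ec⟩ | ⟨hc, ec⟩ | ⟨hc, ec1, ec2, ec3⟩ <;>
    simp_all [feature_octants, feature_octants_alt, pvItems_eval, pvMatchLoop, pvCoord, pvBits,
      PySem.List.pyGet?, PySem.List.pyIdx?]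

-- ===== VERDICT (by name: the statement is the Claim_ definition above) =====
theorem feature_octants_spec : Claim_equal_feature_octants := by
  intro feature _
  unfold Spec_feature_octants
  match feature with
  | [] => exact pvAgree_nil
  | [a] => exact pvAgree1 a
  | [a, b] => exact pvAgree2 a b
  | a :: b :: c :: rest => rw [pvA_take3, pvB_take3]; exact pvAgree3 a b c
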